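-- pv_equiv track=rewrite | github.com/Watesoyan/Leetcode | Solutions/#088. Merge Sorted Array.py | bisect_find
-- ===== SOURCE A (Python) =====
-- def bisect_find(nums1, m, nums2, n):
--     idxs = [0]*n
--     m_min, m_max = 0, m
--
--     for i in range(n):
--
--         while m_min != m_max:
--
--             mid = (m_min + m_max) // 2
--
--             if nums1[mid] < nums2[i]:
--                 m_min = mid + 1
--             else:
--                 m_max = mid
--
--         idxs[i] = m_min
--
--         m_max = m            # reset m_max
--
--     return idxs
-- ===== SOURCE B (Python) =====
-- def bisect_find(nums1, m, nums2, n):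
--     def search(x, lo, hi):
--         if lo == hi:
--             return lo
--         half = (hi - lo) // 2
--         if nums1[lo + half] < x:
--             return search(x, lo + half + 1, hi)
--         return search(x, lo, lo + half)
--
--     idxs = []
--     lo = 0
--     for i in range(n):
--         lo = search(nums2[i], lo, m)
--         idxs.append(lo)
--     return idxs
-- ===== Notes on version B (the rewrite author's own statement) =====
-- stated objective: alternative
-- what changed: Restructured as pure recursion: a recursive bisect helper over (lo, hi) with a half-offset midpoint and a recursive builder that conses the output list forward, replacing A's while-loop binary search and preallocated index-assigned array; the probe sequence is kept identical because exact equality on unsorted prefixes pins it.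
-- outside the precondition, e.g. on bisect_find([9, 9], 3, [0], 1): A returns [0], B returns [0]; on bisect_find([1], 1, [-1, 8], 3): A returns [0, 1, 1], B raises IndexError
import Mathlib
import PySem

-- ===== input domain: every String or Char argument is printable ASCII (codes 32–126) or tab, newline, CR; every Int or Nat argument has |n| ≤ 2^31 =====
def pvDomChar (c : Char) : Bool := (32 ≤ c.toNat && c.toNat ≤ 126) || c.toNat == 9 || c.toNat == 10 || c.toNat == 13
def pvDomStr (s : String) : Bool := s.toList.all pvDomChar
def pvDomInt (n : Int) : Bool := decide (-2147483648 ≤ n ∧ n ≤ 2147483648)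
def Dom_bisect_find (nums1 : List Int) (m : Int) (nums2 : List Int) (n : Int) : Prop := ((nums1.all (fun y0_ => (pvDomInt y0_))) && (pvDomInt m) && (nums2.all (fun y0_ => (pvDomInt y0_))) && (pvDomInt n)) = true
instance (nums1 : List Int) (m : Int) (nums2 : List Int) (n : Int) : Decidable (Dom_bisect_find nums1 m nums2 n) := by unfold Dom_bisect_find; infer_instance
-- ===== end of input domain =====

-- B restructures A as pure recursion (recursive bisect helper with half-offset midpoint,
-- cons-built output list) instead of a while loop writing into a preallocated array;
-- the probe sequence is identical (exact agreement on unsorted prefixes pins it), so this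
-- is a different decomposition of the same algorithm, not claimed faster.

-- ===== PORT A =====
-- the `while m_min != m_max` binary-search loop of A.  Python's guard is `!=`; on every
-- reachable state m_min ≤ m_max holds (so `<` is the same test), and for m_min > m_max
-- the Python loop never terminates — unreachable under Pre_.  The fuel argument, always
-- called with (m_max - m_min).toNat, only makes the loop total (each pass shrinks the
-- interval by at least 1); it changes no value.
def bsLoop (nums1 : List Int) (x : Int) : Nat → Int → Int → Int
  | 0, mMin, _mMax => mMin
  | fuel + 1, mMin, mMax =>
    if mMin < mMax then
      let mid := PySem.Int.floordiv (mMin + mMax) 2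
      match PySem.List.pyGet? nums1 mid with
      | some v =>
          if v < x then bsLoop nums1 x fuel (mid + 1) mMax else bsLoop nums1 x fuel mMin mid
      | none => mMin   -- nums1[mid] raises IndexError in Python; unreachable under Pre_
    else mMin

-- body of A's `for i in range(n)` loop; state = (idxs, m_min, m_max)
def stepA (nums1 : List Int) (m : Int) (nums2 : List Int)
    (st : List Int × Int × Int) (i : Int) : List Int × Int × Int :=
  let mMin := bsLoop nums1 (PySem.List.pyGetD nums2 i 0) (st.2.2 - st.2.1).toNat st.2.1 st.2.2
  (PySem.List.pySetD st.1 i mMin, mMin, m)     -- idxs[i] = m_min; m_max = m (reset)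

def bisect_find (nums1 : List Int) (m : Int) (nums2 : List Int) (n : Int) : List Int :=
  ((PySem.List.pyRange 0 n 1).foldl (stepA nums1 m nums2)
    (List.replicate n.toNat 0, 0, m)).1        -- idxs = [0]*n; m_min, m_max = 0, m

-- ===== PORT B =====
-- B's recursive `search(x, lo, hi)`.  Python's base test is `lo == hi`; on every
-- reachable call lo ≤ hi holds (so `¬ lo < hi` is the same test), and for lo > hi the
-- Python recursion never returns — unreachable under Pre_.  The fuel argument, always
-- called with (hi - lo).toNat, only makes the recursion total; it changes no value.
def srch (nums1 : List Int) (x : Int) : Nat → Int → Int → Int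
  | 0, lo, _hi => lo
  | fuel + 1, lo, hi =>
    if lo < hi then
      let half := PySem.Int.floordiv (hi - lo) 2
      match PySem.List.pyGet? nums1 (lo + half) with
      | some v =>
          if v < x then srch nums1 x fuel (lo + half + 1) hi else srch nums1 x fuel lo (lo + half)
      | none => lo   -- nums1[lo+half] raises IndexError in Python; unreachable under Pre_
    else lo

-- B's `for i in range(n)` loop carrying (i, lo, idxs); the fuel is the number of
-- remaining iterations (initially n.toNat, the length of range(n))
def loopB (nums1 : List Int) (m : Int) (nums2 : List Int) : Nat → Int → Int → List Int → List Int
  | 0, _i, _lo, idxs => idxs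
  | fuel + 1, i, lo, idxs =>
    let j := srch nums1 (PySem.List.pyGetD nums2 i 0) (m - lo).toNat lo m   -- lo = search(nums2[i], lo, m)
    loopB nums1 m nums2 fuel (i + 1) j (idxs ++ [j])                        -- idxs.append(lo)

def bisect_find_alt (nums1 : List Int) (m : Int) (nums2 : List Int) (n : Int) : List Int :=
  loopB nums1 m nums2 n.toNat 0 0 []

-- ===== PRECONDITION & SPEC =====
-- Pre_ = the inputs on which the Python A returns normally, up to one stated narrowing:
-- for n ≤ 0 A returns [] and nothing is excluded; for n > 0 it excludes m < 0 (A's while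
-- loop never terminates), m > len(nums1) (A's binary search generally raises IndexError;
-- on the rare such inputs whose probes stay in range A returns and B returns the same
-- value), and n > len(nums2) (A generally raises IndexError at nums2[i], but skips the
-- read — and returns — once the search window has collapsed, where B always reads
-- nums2[i] and raises); see cites for both.
def Pre_bisect_find (nums1 : List Int) (m : Int) (nums2 : List Int) (n : Int) : Prop :=
  0 < n → (0 ≤ m ∧ m.toNat ≤ nums1.length ∧ n ≤ (nums2.length : Int))
instance (nums1 : List Int) (m : Int) (nums2 : List Int) (n : Int) : Decidable (Pre_bisect_find nums1 m nums2 n) := by unfold Pre_bisect_find; infer_instance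

def pvWitness_bisect_find : List Int × Int × List Int × Int := ([1, 3, 0], 2, [2], 1)

def Spec_bisect_find (nums1 : List Int) (m : Int) (nums2 : List Int) (n : Int) (out : List Int) : Prop := out = bisect_find_alt nums1 m nums2 n
instance (nums1 : List Int) (m : Int) (nums2 : List Int) (n : Int) (out : List Int) : Decidable (Spec_bisect_find nums1 m nums2 n out) := by unfold Spec_bisect_find; infer_instance

-- ===== CLAIM (what is proved, stated in full; the proofs are below) =====
def Claim_equal_bisect_find : Prop := ∀ (nums1 : List Int) (m : Int) (nums2 : List Int) (n : Int), Dom_bisect_find nums1 m nums2 n → Pre_bisect_find nums1 m nums2 n → Spec_bisect_find nums1 m nums2 n (bisect_find nums1 m nums2 n)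

-- ===== LEMMAS AND PROOFS =====

-- the two binary searches take the same probes (lo + (hi-lo)//2 = (lo+hi)//2) and any
-- sufficient fuel computes the same value
theorem srch_eq_bsLoop (nums1 : List Int) (x : Int) :
    ∀ (f₁ f₂ : Nat) (lo hi : Int), (hi - lo).toNat ≤ f₁ → (hi - lo).toNat ≤ f₂ →
      srch nums1 x f₁ lo hi = bsLoop nums1 x f₂ lo hi := by
  intro f₁
  induction f₁ with
  | zero =>
    intro f₂ lo hi h₁ h₂
    cases f₂ with
    | zero => rfl
    | succ f₂ => rw [srch, bsLoop, if_neg (by omega)]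
  | succ f₁ ih =>
    intro f₂ lo hi h₁ h₂
    cases f₂ with
    | zero => rw [srch, bsLoop, if_neg (by omega)]
    | succ f₂ =>
      rw [srch, bsLoop]
      by_cases hlt : lo < hi
      · rw [if_pos hlt, if_pos hlt]
        have e1 := PySem.Int.floordiv_eq_ediv_of_pos (a := lo + hi) (b := 2) (by omega)
        have e2 := PySem.Int.floordiv_eq_ediv_of_pos (a := hi - lo) (b := 2) (by omega)
        have hmid : lo + PySem.Int.floordiv (hi - lo) 2 = PySem.Int.floordiv (lo + hi) 2 := by
          rw [e1, e2]; omega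
        simp only [hmid]
        cases hg : PySem.List.pyGet? nums1 (PySem.Int.floordiv (lo + hi) 2) with
        | none => rfl
        | some v =>
          by_cases hv : v < x
          · simp only [hv, if_true]
            exact ih f₂ _ _ (by omega) (by omega)
          · simp only [hv, if_false]
            exact ih f₂ _ _ (by omega) (by omega)
      · rw [if_neg hlt, if_neg hlt]

-- B's loop accumulator factors out
theorem loopB_acc (nums1 : List Int) (m : Int) (nums2 : List Int) :
    ∀ (fuel : Nat) (i lo : Int) (a b : List Int),
      loopB nums1 m nums2 fuel i lo (a ++ b) = a ++ loopB nums1 m nums2 fuel i lo b := by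
  intro fuel
  induction fuel with
  | zero => intro i lo a b; rfl
  | succ fuel ih =>
    intro i lo a b
    rw [loopB, loopB, List.append_assoc, ih]

-- A's fold over range(t, n), started on any list of length n, yields its first t
-- entries followed by B's remaining loop iterations from (t, lo)
theorem fold_eq_loopB (nums1 : List Int) (m : Int) (nums2 : List Int) (n : Int) :
    ∀ (d t : Nat) (L : List Int) (lo : Int), n.toNat - t ≤ d → t ≤ n.toNat →
      L.length = n.toNat →
      ((PySem.List.pyRange (t : Int) n 1).foldl (stepA nums1 m nums2) (L, lo, m)).1 =
        L.take t ++ loopB nums1 m nums2 (n.toNat - t) (t : Int) lo [] := by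
  intro d
  induction d with
  | zero =>
    intro t L lo hd ht hL
    have htn : t = n.toNat := by omega
    rw [PySem.List.pyRange_one_eq_nil (by omega), show n.toNat - t = 0 by omega, loopB]
    simp [htn, ← hL]
  | succ d ih =>
    intro t L lo hd ht hL
    by_cases htn : t = n.toNat
    · rw [PySem.List.pyRange_one_eq_nil (by omega), show n.toNat - t = 0 by omega, loopB]
      simp [htn, ← hL]
    · have htlt : (t : Int) < n := by omega
      rw [PySem.List.pyRange_one_cons (by omega), List.foldl_cons]
      have hstep : stepA nums1 m nums2 (L, lo, m) (t : Int) =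
          (PySem.List.pySetD L (t : Int)
             (bsLoop nums1 (PySem.List.pyGetD nums2 (t : Int) 0) (m - lo).toNat lo m),
           bsLoop nums1 (PySem.List.pyGetD nums2 (t : Int) 0) (m - lo).toNat lo m, m) := rfl
      rw [hstep]
      set j := bsLoop nums1 (PySem.List.pyGetD nums2 (t : Int) 0) (m - lo).toNat lo m with hj
      have hset : PySem.List.pySetD L (t : Int) j = L.set t j := PySem.List.pySetD_natCast L t j
      have hcast : ((t + 1 : Nat) : Int) = (t : Int) + 1 := by push_cast; ring
      have hrec := ih (t + 1) (L.set t j) j (by omega) (by omega) (by simp [hL])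
      rw [hcast] at hrec
      rw [hset, hrec]
      have htake : (L.set t j).take (t + 1) = L.take t ++ [j] := by
        have hlt : t < L.length := by omega
        rw [List.set_eq_take_append_cons_drop, if_pos hlt]
        rw [List.take_append]
        simp [List.length_take, Nat.min_eq_left (le_of_lt hlt), List.take_take]
      have hsrch : srch nums1 (PySem.List.pyGetD nums2 (t : Int) 0) (m - lo).toNat lo m = j := by
        rw [hj]; exact srch_eq_bsLoop nums1 _ (m - lo).toNat (m - lo).toNat lo m le_rfl le_rfl
      have hfuel : n.toNat - t = (n.toNat - (t + 1)) + 1 := by omega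
      have hgo : loopB nums1 m nums2 (n.toNat - t) (t : Int) lo [] =
          j :: loopB nums1 m nums2 (n.toNat - (t + 1)) ((t : Int) + 1) j [] := by
        rw [hfuel, loopB]
        simp only [hsrch, List.nil_append]
        have := loopB_acc nums1 m nums2 (n.toNat - (t + 1)) ((t : Int) + 1) j [j] []
        simpa using this
      rw [htake, hgo]
      simp
-- ===== VERDICT (by name: the statement is the Claim_ definition above) =====
theorem bisect_find_spec : Claim_equal_bisect_find := by
  unfold Claim_equal_bisect_find
  intro nums1 m nums2 n _hdom _hpre
  unfold Spec_bisect_find bisect_find bisect_find_alt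
  have h := fold_eq_loopB nums1 m nums2 n n.toNat 0 (List.replicate n.toNat 0) 0
    (by omega) (by omega) (by simp)
  simpa using h
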